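-- pv_equiv track=rewrite | github.com/Derrick-189/defi-guardian | rust_verifiers.py | _strip_functions_with_kani
-- ===== SOURCE A (Python) =====
-- def _strip_functions_with_kani(lines):
--     out = []
--     i = 0
--     while i < len(lines):
--         line = lines[i]
--         if "fn " in line:
--             j = i
--             header = []
--             while j < len(lines):
--                 header.append(lines[j])
--                 if "{" in lines[j]:
--                     break
--                 if ";" in lines[j]:
--                     break
--                 j += 1
--             header_text = "".join(header)
--             if "kani::" in header_text:
--                 i = j + 1
--                 depth = header_text.count("{") - header_text.count("}")
--                 while i < len(lines) and depth > 0: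
--                     depth += lines[i].count("{") - lines[i].count("}")
--                     i += 1
--                 continue
--         if "kani::" not in line:
--             out.append(line)
--         i += 1
--     return out
-- ===== SOURCE B (Python) =====
-- def _strip_functions_with_kani(lines):
--     n = len(lines)
--     # stop[k] = nearest index >= k whose line contains '{' or ';' (n if none); built right-to-left
--     stop = [n] * (n + 1)
--     for k in range(n - 1, -1, -1):
--         stop[k] = k if "{" in lines[k] or ";" in lines[k] else stop[k + 1]
--     # cum[k] = brace balance of lines[:k]; the body of a function starting at line i
--     # ends just before the first m with cum[m] <= cum[i]
--     cum = [0] * (n + 1)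
--     for k in range(n):
--         cum[k + 1] = cum[k] + lines[k].count("{") - lines[k].count("}")
--     out = []
--     i = 0
--     while i < n:
--         s = stop[i]
--         if "fn " in lines[i] and "kani::" in "".join(lines[i:s + 1]):
--             base = cum[i]
--             i = s + 1
--             while i < n and cum[i] > base:
--                 i += 1
--         else:
--             if "kani::" not in lines[i]:
--                 out.append(lines[i])
--             i += 1
--     return out
-- ===== Notes on version B (the rewrite author's own statement) =====
-- stated objective: alternative
-- what changed: B replaces A's interleaved lookahead scans with two precomputed tables - a right-to-left next-stop table (nearest line with '{' or ';') and a prefix-sum array of brace balances - so the emit loop finds each header end by one table lookup and each body end as the first index whose cumulative brace balance falls back to the balance at the function start, instead of re-scanning and re-counting lines.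
import Mathlib
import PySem

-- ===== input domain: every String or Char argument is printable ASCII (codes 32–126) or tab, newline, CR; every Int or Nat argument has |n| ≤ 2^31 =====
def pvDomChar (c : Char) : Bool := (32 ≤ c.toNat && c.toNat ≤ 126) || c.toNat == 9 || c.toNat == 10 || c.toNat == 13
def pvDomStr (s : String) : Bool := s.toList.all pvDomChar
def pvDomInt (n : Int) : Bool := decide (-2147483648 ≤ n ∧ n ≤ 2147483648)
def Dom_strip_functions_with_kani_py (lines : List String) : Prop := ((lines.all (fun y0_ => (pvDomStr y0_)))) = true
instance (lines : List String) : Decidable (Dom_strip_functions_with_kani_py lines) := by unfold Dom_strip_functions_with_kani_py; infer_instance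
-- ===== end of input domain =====

-- B precomputes a next-stop table and brace-balance prefix sums so the emit loop needs
-- no lookahead re-scans; same output, alternative algorithm (no speed claim).

-- ===== PORT A =====
-- inner header loop: append lines[j] until one contains "{" or ";"; returns (header, rest after break line)
def kaniHeaderScanA (hdr : List String) (ls : List String) : List String × List String :=
  match ls with
  | [] => (hdr, [])
  | l :: rest =>
    let hdr' := hdr ++ [l]
    if PySem.Str.isIn "{" l then (hdr', rest)
    else if PySem.Str.isIn ";" l then (hdr', rest)
    else kaniHeaderScanA hdr' rest

-- inner skip loop: while i < len(lines) and depth > 0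
def kaniSkipA (depth : Int) (ls : List String) : List String :=
  match ls with
  | [] => []
  | l :: rest =>
    if 0 < depth then
      kaniSkipA (depth + (PySem.Str.count l "{" : Int) - (PySem.Str.count l "}" : Int)) rest
    else l :: rest

theorem kaniHeaderScanA_snd_le (ls : List String) : ∀ hdr,
    ((kaniHeaderScanA hdr ls).2).length ≤ ls.length - 1 := by
  induction ls with
  | nil => intro hdr; simp [kaniHeaderScanA]
  | cons l rest ih =>
    intro hdr
    simp only [kaniHeaderScanA]
    split
    · simp
    · split
      · simp
      · have := ih (hdr ++ [l])
        simp only [List.length_cons]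
        omega

theorem kaniSkipA_len (depth : Int) (ls : List String) :
    (kaniSkipA depth ls).length ≤ ls.length := by
  induction ls generalizing depth with
  | nil => simp [kaniSkipA]
  | cons l rest ih =>
    simp only [kaniSkipA]
    split
    · have := ih (depth + (PySem.Str.count l "{" : Int) - (PySem.Str.count l "}" : Int))
      simp only [List.length_cons]; omega
    · simp

-- the outer while loop of A, as recursion on the remaining suffix
def kaniGoA : List String → List String
  | [] => []
  | line :: rest =>
    if PySem.Str.isIn "fn " line then
      let p := kaniHeaderScanA [] (line :: rest)
      let htext := PySem.Str.join "" p.1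
      if PySem.Str.isIn "kani::" htext then
        kaniGoA (kaniSkipA ((PySem.Str.count htext "{" : Int) - (PySem.Str.count htext "}" : Int)) p.2)
      else
        if PySem.Str.isIn "kani::" line then kaniGoA rest else line :: kaniGoA rest
    else
      if PySem.Str.isIn "kani::" line then kaniGoA rest else line :: kaniGoA rest
termination_by ls => ls.length
decreasing_by
  · have h1 := kaniSkipA_len ((PySem.Str.count (PySem.Str.join "" (kaniHeaderScanA [] (line :: rest)).1) "{" : Int) - (PySem.Str.count (PySem.Str.join "" (kaniHeaderScanA [] (line :: rest)).1) "}" : Int)) (kaniHeaderScanA [] (line :: rest)).2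
    have h2 := kaniHeaderScanA_snd_le (line :: rest) []
    simp only [List.length_cons] at *; omega
  all_goals simp

def strip_functions_with_kani_py (lines : List String) : List String :=
  kaniGoA lines

-- ===== PORT B =====
-- the backward pass building stop[idx..n]: stop[k] = k if lines[k] has "{" or ";" else stop[k+1]
def kaniStops (idx : Nat) : List String → List Nat
  | [] => [idx]
  | l :: rest =>
    let tail := kaniStops (idx + 1) rest
    (if PySem.Str.isIn "{" l || PySem.Str.isIn ";" l then idx else tail.headD (idx + 1)) :: tail

-- the forward pass building cum[0..n]: cum[k+1] = cum[k] + lines[k].count("{") - lines[k].count("}")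
def kaniCum : List String → Int → List Int
  | [], c => [c]
  | l :: rest, c =>
    c :: kaniCum rest (c + (PySem.Str.count l "{" : Int) - (PySem.Str.count l "}" : Int))

-- the inner while loop: while i < n and cum[i] > base: i += 1 (returns the final i)
def kaniBodyB (n : Nat) (cum : List Int) (base : Int) (m : Nat) : Nat :=
  if m < n ∧ base < cum.getD m 0 then kaniBodyB n cum base (m + 1) else m
termination_by n - m
decreasing_by omega

theorem kaniBodyB_ge (n : Nat) (cum : List Int) (base : Int) (m : Nat) :
    m ≤ kaniBodyB n cum base m := by
  unfold kaniBodyB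
  split
  · have := kaniBodyB_ge n cum base (m + 1); omega
  · exact le_rfl
termination_by n - m
decreasing_by omega

theorem kaniStops_getD_ge (ls : List String) : ∀ (idx k : Nat), k ≤ ls.length →
    idx + k ≤ (kaniStops idx ls).getD k 0 := by
  induction ls with
  | nil =>
    intro idx k hk
    have hk0 : k = 0 := by simpa using hk
    subst hk0
    simp [kaniStops]
  | cons l rest ih =>
    intro idx k hk
    match k with
    | 0 =>
      simp only [kaniStops, List.getD_cons_zero]
      split
      · omega
      · match rest with
        | [] => simp [kaniStops]
        | r :: rs =>
          have h0 := ih (idx + 1) 0 (by simp)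
          have hh : (kaniStops (idx + 1) (r :: rs)).headD (idx + 1) =
              (kaniStops (idx + 1) (r :: rs)).getD 0 0 := by
            simp [kaniStops, List.headD, List.getD]
          rw [hh]
          omega
    | k + 1 =>
      simp only [kaniStops, List.getD_cons_succ]
      have := ih (idx + 1) k (by simpa using hk)
      omega

-- the outer while loop of B (the two tables are fixed values of lines, looked up each step)
def kaniGoB (lines : List String) (i : Nat) : List String :=
  if i < lines.length then
    let stops := kaniStops 0 lines
    let cum := kaniCum lines 0
    let s := stops.getD i 0
    let line := lines.getD i ""
    if PySem.Str.isIn "fn " line &&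
        PySem.Str.isIn "kani::"
          (PySem.Str.join "" (PySem.List.slice lines (some (i : Int)) (some ((s : Int) + 1)))) then
      kaniGoB lines (kaniBodyB lines.length cum (cum.getD i 0) (s + 1))
    else
      if PySem.Str.isIn "kani::" line then kaniGoB lines (i + 1)
      else line :: kaniGoB lines (i + 1)
  else []
termination_by lines.length - i
decreasing_by
  · have hs := kaniStops_getD_ge lines 0 i (by omega)
    have hb := kaniBodyB_ge lines.length (kaniCum lines 0) ((kaniCum lines 0).getD i 0)
      ((kaniStops 0 lines).getD i 0 + 1)
    omega
  · omega
  · omega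

def strip_functions_with_kani_py_alt (lines : List String) : List String :=
  kaniGoB lines 0

-- ===== PRECONDITION & SPEC =====
def Spec_strip_functions_with_kani_py (lines : List String) (out : List String) : Prop := out = strip_functions_with_kani_py_alt lines
instance (lines : List String) (out : List String) : Decidable (Spec_strip_functions_with_kani_py lines out) := by unfold Spec_strip_functions_with_kani_py; infer_instance

-- ===== CLAIM (what is proved, stated in full; the proofs are below) =====
def Claim_equal_strip_functions_with_kani_py : Prop := ∀ (lines : List String), Dom_strip_functions_with_kani_py lines → Spec_strip_functions_with_kani_py lines (strip_functions_with_kani_py lines)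

-- ===== LEMMAS AND PROOFS =====

-- number of leading lines containing neither "{" nor ";"
def stopLenB : List String → Nat
  | [] => 0
  | l :: rest =>
    if PySem.Str.isIn "{" l then 0
    else if PySem.Str.isIn ";" l then 0
    else stopLenB rest + 1

-- number of lines A's skip loop consumes from a given depth
def skipCnt : Int → List String → Nat
  | _, [] => 0
  | depth, l :: rest =>
    if 0 < depth then
      skipCnt (depth + (PySem.Str.count l "{" : Int) - (PySem.Str.count l "}" : Int)) rest + 1
    else 0

-- brace-balance of one line / of a list of lines
def deltaB (l : String) : Int := (PySem.Str.count l "{" : Int) - (PySem.Str.count l "}" : Int)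

def prefDelta (ls : List String) : Int := (ls.map deltaB).sum

-- A's header scan is "take (stopLenB+1) / drop (stopLenB+1)"
theorem kaniHeaderScanA_eq (ls : List String) : ∀ hdr,
    kaniHeaderScanA hdr ls =
      (hdr ++ ls.take (stopLenB ls + 1), ls.drop (stopLenB ls + 1)) := by
  induction ls with
  | nil => intro hdr; simp [kaniHeaderScanA, stopLenB]
  | cons l rest ih =>
    intro hdr
    simp only [kaniHeaderScanA, stopLenB]
    split
    · simp
    · split
      · simp
      · simp only [List.take_succ_cons, List.drop_succ_cons]
        rw [ih (hdr ++ [l])]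
        simp

-- A's skip loop is "drop (skipCnt …)"
theorem kaniSkipA_eq (ls : List String) : ∀ depth,
    kaniSkipA depth ls = ls.drop (skipCnt depth ls) := by
  induction ls with
  | nil => intro depth; simp [kaniSkipA, skipCnt]
  | cons l rest ih =>
    intro depth
    simp only [kaniSkipA, skipCnt]
    split
    · rw [ih]; simp
    · simp

-- Python's s.count(c) for a single character c is the character count
theorem count_go_singleton (c : Char) : ∀ (fuel : Nat) (s : List Char) (acc : Nat),
    s.length ≤ fuel → PySem.Chars.count.go [c] fuel s acc = acc + s.count c := by
  intro fuel
  induction fuel with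
  | zero =>
    intro s acc hs
    have : s = [] := List.eq_nil_of_length_eq_zero (by omega)
    subst this; simp [PySem.Chars.count.go]
  | succ fuel ih =>
    intro s acc hs
    match s with
    | [] => simp [PySem.Chars.count.go]
    | h :: t =>
      have hp : [c].isPrefixOf (h :: t) = (c == h) := by simp [List.isPrefixOf]
      have hd : List.drop [c].length (h :: t) = t := by simp
      have ht : t.length ≤ fuel := by
        simp only [List.length_cons] at hs; omega
      by_cases hc : c = h
      · subst hc
        simp only [PySem.Chars.count.go, hp, BEq.rfl, if_true, hd]
        rw [ih t (acc + 1) ht]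
        simp [List.count_cons]
        omega
      · have hb : (c == h) = false := by simp [hc]
        simp only [PySem.Chars.count.go, hp, hb, Bool.false_eq_true, if_false]
        rw [ih t acc ht]
        simp [List.count_cons, Ne.symm hc]

theorem chars_count_singleton (s : List Char) (c : Char) :
    PySem.Chars.count s [c] = s.count c := by
  simp only [PySem.Chars.count, List.isEmpty_cons, Bool.false_eq_true, if_false]
  simpa using count_go_singleton c s.length s 0 le_rfl

theorem str_count_brace (l : String) (c : Char) (sub : String) (hsub : sub.toList = [c]) :
    PySem.Str.count l sub = l.toList.count c := by
  have : PySem.Str.count l sub = PySem.Chars.count l.toList sub.toList := by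
    simp [PySem.Str.count_eq]
  rw [this, hsub, chars_count_singleton]

-- count of a single character distributes over "".join
theorem count_join_eq_sum (c : Char) (parts : List String) :
    ((PySem.Str.join "" parts).toList.count c : Int) =
      (parts.map (fun l => (l.toList.count c : Int))).sum := by
  have hj : (PySem.Str.join "" parts).toList =
      PySem.Chars.join "".toList (parts.map String.toList) := by
    simp [PySem.Str.toList_join]
  rw [hj]
  show ((List.intercalate [] (parts.map String.toList)).count c : Int) = _
  have hflat : ∀ (L : List (List Char)), List.intercalate ([] : List Char) L = L.flatten := by
    intro L
    induction L with
    | nil => simp [List.intercalate]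
    | cons p ps ih =>
      cases ps with
      | nil => simp [List.intercalate, List.intersperse]
      | cons q qs =>
        simp [List.intercalate, List.intersperse] at ih ⊢
        exact ih
  rw [hflat, List.count_flatten]
  push_cast [List.map_map]
  simp [Function.comp_def]

-- the header's brace balance is the sum of its lines' balances
theorem delta_join (parts : List String) :
    (PySem.Str.count (PySem.Str.join "" parts) "{" : Int) -
      (PySem.Str.count (PySem.Str.join "" parts) "}" : Int) = prefDelta parts := by
  rw [str_count_brace _ '{' "{" rfl, str_count_brace _ '}' "}" rfl]
  rw [count_join_eq_sum, count_join_eq_sum]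
  unfold prefDelta
  induction parts with
  | nil => simp
  | cons p ps ih =>
    simp only [List.map_cons, List.sum_cons, deltaB]
    rw [str_count_brace _ '{' "{" rfl, str_count_brace _ '}' "}" rfl]
    omega

theorem prefDelta_append (a b : List String) :
    prefDelta (a ++ b) = prefDelta a + prefDelta b := by
  simp [prefDelta]

-- the stop table realizes stopLenB of the suffix
theorem kaniStops_getD (ls : List String) : ∀ (idx k : Nat), k ≤ ls.length →
    (kaniStops idx ls).getD k 0 = idx + k + stopLenB (ls.drop k) := by
  induction ls with
  | nil =>
    intro idx k hk
    have hk0 : k = 0 := by simpa using hk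
    subst hk0
    simp [kaniStops, stopLenB]
  | cons l rest ih =>
    intro idx k hk
    match k with
    | 0 =>
      simp only [kaniStops, List.getD_cons_zero, List.drop_zero]
      by_cases h1 : PySem.Chars.isIn ['{'] l.toList = true
      · simp [stopLenB, h1]
      · by_cases h2 : PySem.Chars.isIn [';'] l.toList = true
        · simp [stopLenB, h1, h2]
        · simp only [stopLenB, PySem.Str.isIn_eq, h1, h2, Bool.false_eq_true, if_false,
            false_or, or_false]
          match rest with
          | [] => simp [h1, h2, kaniStops, stopLenB]
          | r :: rs =>
            have h0 := ih (idx + 1) 0 (by simp)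
            simp only [List.drop_zero] at h0
            rcases hcons : kaniStops (idx + 1) (r :: rs) with _ | ⟨a, tl⟩
            · simp [kaniStops] at hcons
            · rw [hcons] at h0
              simp only [List.getD_cons_zero] at h0
              simp [h1, h2, hcons]
              omega
    | k + 1 =>
      simp only [kaniStops, List.getD_cons_succ, List.drop_succ_cons]
      rw [ih (idx + 1) k (by simpa using hk)]
      omega

-- the prefix-sum table realizes prefDelta of the prefix
theorem kaniCum_getD (ls : List String) : ∀ (c : Int) (k : Nat), k ≤ ls.length →
    (kaniCum ls c).getD k 0 = c + prefDelta (ls.take k) := by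
  induction ls with
  | nil =>
    intro c k hk
    have hk0 : k = 0 := by simpa using hk
    subst hk0
    simp [kaniCum, prefDelta]
  | cons l rest ih =>
    intro c k hk
    match k with
    | 0 => simp [kaniCum, prefDelta]
    | k + 1 =>
      simp only [kaniCum, List.getD_cons_succ, List.take_succ_cons]
      rw [ih _ k (by simpa using hk)]
      simp only [prefDelta, List.map_cons, List.sum_cons, deltaB]
      ring

-- B's inner loop lands exactly skipCnt lines further, with the depth read off the table
theorem kaniBodyB_eq (lines : List String) (base : Int) : ∀ (m : Nat),
    kaniBodyB lines.length (kaniCum lines 0) base m =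
      m + skipCnt ((kaniCum lines 0).getD m 0 - base) (lines.drop m) := by
  intro m
  by_cases hm : m < lines.length
  · rw [List.drop_eq_getElem_cons hm]
    unfold kaniBodyB
    simp only [skipCnt]
    by_cases hd : base < (kaniCum lines 0).getD m 0
    · simp only [hm, hd, and_self, if_true, sub_pos.mpr hd, if_pos (sub_pos.mpr hd)]
      rw [kaniBodyB_eq lines base (m + 1)]
      have hnext : (kaniCum lines 0).getD (m + 1) 0 =
          (kaniCum lines 0).getD m 0 + deltaB lines[m] := by
        rw [kaniCum_getD lines 0 (m + 1) (by omega), kaniCum_getD lines 0 m (by omega)]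
        rw [List.take_succ]
        simp only [List.getElem?_eq_getElem hm]
        rw [prefDelta_append]
        simp [prefDelta]
      have : (kaniCum lines 0).getD m 0 - base +
            (PySem.Str.count lines[m] "{" : Int) - (PySem.Str.count lines[m] "}" : Int) =
          (kaniCum lines 0).getD (m + 1) 0 - base := by
        rw [hnext]; unfold deltaB; ring
      rw [this]; omega
    · have hng : ¬ (0 < (kaniCum lines 0).getD m 0 - base) := by omega
      simp only [hm, hd, and_false, if_false, hng, if_false]
      omega
  · have hdrop : lines.drop m = [] := List.drop_eq_nil_of_le (by omega)
    unfold kaniBodyB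
    simp [hm, hdrop, skipCnt]
termination_by m => lines.length - m
decreasing_by omega

-- main correspondence: B's table-driven loop at index i equals A's loop on the suffix
theorem kaniGoB_eq (lines : List String) : ∀ (N i : Nat), lines.length - i ≤ N →
    kaniGoB lines i = kaniGoA (lines.drop i) := by
  intro N
  induction N with
  | zero =>
    intro i hi
    have h1 : ¬ i < lines.length := by omega
    have h2 : lines.drop i = [] := List.drop_eq_nil_of_le (by omega)
    rw [kaniGoB, h2]
    simp [h1, kaniGoA]
  | succ N ihN =>
    intro i hi
    by_cases hin : i < lines.length
    · have hdropc := List.drop_eq_getElem_cons hin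
      have hline : lines.getD i "" = lines[i] := List.getD_eq_getElem lines "" hin
      set stop2 := stopLenB (lines.drop (i + 1)) with hst
      have hstop : (kaniStops 0 lines).getD i 0 = i + stopLenB (lines.drop i) := by
        simpa using kaniStops_getD lines 0 i (by omega)
      -- the header slice equals A's header-scan prefix
      have hslice : PySem.List.slice lines (some (i : Int))
            (some (((kaniStops 0 lines).getD i 0 : Int) + 1)) =
          (lines.drop i).take (stopLenB (lines.drop i) + 1) := by
        rw [hstop]
        have hcast : ((i + stopLenB (lines.drop i) : Nat) : Int) + 1 =
            (i : Int) + ((stopLenB (lines.drop i) + 1 : Nat) : Int) := by push_cast; ring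
        rw [hcast, PySem.List.slice_natCast_add]
      rw [kaniGoB, hdropc, kaniGoA]
      simp only [hin, if_true, hline, hslice, ← hdropc]
      by_cases hfn : PySem.Str.isIn "fn " lines[i]
      · simp only [hfn, Bool.true_and, if_true]
        rw [kaniHeaderScanA_eq]
        simp only [List.nil_append]
        set hdr := (lines.drop i).take (stopLenB (lines.drop i) + 1) with hhdr
        by_cases hk : PySem.Str.isIn "kani::" (PySem.Str.join "" hdr)
        · simp only [hk, if_true]
          -- both sides skip the body; show the landing indices agree
          rw [hstop, kaniSkipA_eq, kaniBodyB_eq]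
          set sl := stopLenB (lines.drop i) with hsl
          have hdd : (lines.drop i).drop (sl + 1) = lines.drop (i + sl + 1) := by
            rw [List.drop_drop]; ring_nf
          have hseed : skipCnt ((kaniCum lines 0).getD (i + sl + 1) 0 -
                (kaniCum lines 0).getD i 0) (lines.drop (i + sl + 1)) =
              skipCnt ((PySem.Str.count (PySem.Str.join "" hdr) "{" : Int) -
                (PySem.Str.count (PySem.Str.join "" hdr) "}" : Int)) (lines.drop (i + sl + 1)) := by
            by_cases hend : i + sl + 1 ≤ lines.length
            · congr 1
              rw [delta_join]
              rw [kaniCum_getD lines 0 (i + sl + 1) hend, kaniCum_getD lines 0 i (by omega)]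
              have htk : lines.take (i + sl + 1) = lines.take i ++ hdr := by
                have h3 : i + sl + 1 = i + (sl + 1) := by ring
                rw [h3, List.take_add]
              rw [htk, prefDelta_append]
              ring
            · -- the suffix is empty: both skip counts are 0
              have : lines.drop (i + sl + 1) = [] := List.drop_eq_nil_of_le (by omega)
              rw [this]
              simp [skipCnt]
          rw [hdd, hseed]
          rw [ihN (i + sl + 1 + skipCnt ((PySem.Str.count (PySem.Str.join "" hdr) "{" : Int) -
              (PySem.Str.count (PySem.Str.join "" hdr) "}" : Int)) (lines.drop (i + sl + 1)))
            (by omega)]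
          rw [List.drop_drop]
        · simp only [hk, Bool.and_false, Bool.false_eq_true, if_false]
          by_cases hkl : PySem.Str.isIn "kani::" lines[i]
          · simp only [hkl, if_true]
            exact ihN (i + 1) (by omega)
          · simp only [hkl, Bool.false_eq_true, if_false]
            rw [ihN (i + 1) (by omega)]
      · simp only [hfn, Bool.false_and, Bool.false_eq_true, if_false]
        by_cases hkl : PySem.Str.isIn "kani::" lines[i]
        · simp only [hkl, if_true]
          exact ihN (i + 1) (by omega)
        · simp only [hkl, Bool.false_eq_true, if_false]
          rw [ihN (i + 1) (by omega)]
    · have h2 : lines.drop i = [] := List.drop_eq_nil_of_le (by omega)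
      rw [kaniGoB, h2]
      simp [hin, kaniGoA]

-- ===== VERDICT (by name: the statement is the Claim_ definition above) =====
theorem strip_functions_with_kani_py_spec : Claim_equal_strip_functions_with_kani_py := by
  intro lines _
  unfold Spec_strip_functions_with_kani_py strip_functions_with_kani_py strip_functions_with_kani_py_alt
  rw [kaniGoB_eq lines lines.length 0 (by omega)]
  simp
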